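-- pv_equiv track=rewrite | github.com/rogalski/aoc2016 | src/day20.py | num_allowed_ips
-- ===== SOURCE A (Python) =====
-- def num_allowed_ips(blocked_ranges, namespace_size=10):
--     blocked_ranges.sort()
--     covered_up_to = -1
--     num_valid = namespace_size
--     for start, stop in blocked_ranges:
--         assert stop >= start
--
--         if start <= covered_up_to:
--             start = covered_up_to + 1
--
--         if stop < start:
--             continue
--
--         num_valid -= (stop-start+1)
--
--         if stop > covered_up_to:
--             covered_up_to = stop
--
--     return num_valid
-- ===== SOURCE B (Python) =====
-- def num_allowed_ips(blocked_ranges, namespace_size=10):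
--     blocked_ranges.sort()
--     merged = []  # disjoint blocked intervals over the non-negative address space, in order
--     for start, stop in blocked_ranges:
--         assert stop >= start
--         if stop < 0:
--             continue  # entirely below address 0, blocks nothing
--         start = max(start, 0)  # addresses are numbered from 0
--         if merged and start <= merged[-1][1] + 1:
--             merged[-1][1] = max(merged[-1][1], stop)
--         else:
--             merged.append([start, stop])
--     covered = sum(stop - start + 1 for start, stop in merged)
--     return namespace_size - covered
-- ===== Notes on version B (the rewrite author's own statement) =====
-- stated objective: alternative
-- what changed: Instead of a fused sweep with a running covered_up_to/num_valid accumulator, B sorts, builds an explicit list of merged disjoint blocked intervals (extending the last interval or appending a new one), then sums their lengths in a separate pass and subtracts from namespace_size.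
import Mathlib
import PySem

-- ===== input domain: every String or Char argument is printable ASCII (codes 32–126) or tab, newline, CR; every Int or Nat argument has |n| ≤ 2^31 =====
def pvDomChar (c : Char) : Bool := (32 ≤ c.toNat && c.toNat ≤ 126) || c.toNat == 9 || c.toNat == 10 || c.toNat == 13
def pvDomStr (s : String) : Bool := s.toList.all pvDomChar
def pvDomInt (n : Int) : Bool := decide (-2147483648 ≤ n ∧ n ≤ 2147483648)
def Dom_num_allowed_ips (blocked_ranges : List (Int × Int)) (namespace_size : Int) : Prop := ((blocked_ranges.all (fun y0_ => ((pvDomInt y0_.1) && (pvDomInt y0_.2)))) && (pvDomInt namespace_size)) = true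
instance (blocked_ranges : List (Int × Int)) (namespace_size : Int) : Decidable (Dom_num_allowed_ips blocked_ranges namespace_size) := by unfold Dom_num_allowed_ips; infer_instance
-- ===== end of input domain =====

-- B replaces A's fused running-accumulator sweep by an explicit merged-interval list summed in a
-- second pass (objective: alternative decomposition). Both A and B sort blocked_ranges in place;
-- the equivalence proved here is about the return value.

-- ===== PORT A =====
-- body of A's for-loop over (covered_up_to, num_valid)
def pvAStep (st : Int × Int) (p : Int × Int) : Int × Int :=
  let covered_up_to := st.1
  let num_valid := st.2
  let start := if p.1 ≤ covered_up_to then covered_up_to + 1 else p.1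
  if p.2 < start then st
  else
    let num_valid := num_valid - (p.2 - start + 1)
    let covered_up_to := if p.2 > covered_up_to then p.2 else covered_up_to
    (covered_up_to, num_valid)

def num_allowed_ips (blocked_ranges : List (Int × Int)) (namespace_size : Int) : Int :=
  let bs := PySem.List.sorted2 blocked_ranges (fun p => p.1) (fun p => p.2)
  (bs.foldl pvAStep (-1, namespace_size)).2

-- ===== PORT B =====
-- body of B's for-loop over the merged-interval list (merged[-1][1] = … becomes dropLast ++ [...])
def pvMergeStep (merged : List (Int × Int)) (p : Int × Int) : List (Int × Int) :=
  if p.2 < 0 then merged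
  else
    let start := max p.1 0
    match merged.getLast? with
    | some last =>
        if start ≤ last.2 + 1 then merged.dropLast ++ [(last.1, max last.2 p.2)]
        else merged ++ [(start, p.2)]
    | none => [(start, p.2)]

def num_allowed_ips_alt (blocked_ranges : List (Int × Int)) (namespace_size : Int) : Int :=
  let bs := PySem.List.sorted2 blocked_ranges (fun p => p.1) (fun p => p.2)
  let merged := bs.foldl pvMergeStep []
  namespace_size - merged.foldl (fun acc q => acc + (q.2 - q.1 + 1)) 0

-- ===== PRECONDITION & SPEC =====
-- Pre_ excludes exactly the inputs on which A's `assert stop >= start` raises AssertionError.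
def Pre_num_allowed_ips (blocked_ranges : List (Int × Int)) (namespace_size : Int) : Prop :=
  ∀ p ∈ blocked_ranges, p.1 ≤ p.2
instance (blocked_ranges : List (Int × Int)) (namespace_size : Int) : Decidable (Pre_num_allowed_ips blocked_ranges namespace_size) := by unfold Pre_num_allowed_ips; infer_instance
def pvWitness_num_allowed_ips : (List (Int × Int)) × Int := ([(5, 7), (0, 2)], 10)

def Spec_num_allowed_ips (blocked_ranges : List (Int × Int)) (namespace_size : Int) (out : Int) : Prop := out = num_allowed_ips_alt blocked_ranges namespace_size
instance (blocked_ranges : List (Int × Int)) (namespace_size : Int) (out : Int) : Decidable (Spec_num_allowed_ips blocked_ranges namespace_size out) := by unfold Spec_num_allowed_ips; infer_instance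

-- ===== CLAIM (what is proved, stated in full; the proofs are below) =====
def Claim_equal_num_allowed_ips : Prop := ∀ (blocked_ranges : List (Int × Int)) (namespace_size : Int), Dom_num_allowed_ips blocked_ranges namespace_size → Pre_num_allowed_ips blocked_ranges namespace_size → Spec_num_allowed_ips blocked_ranges namespace_size (num_allowed_ips blocked_ranges namespace_size)

-- ===== LEMMAS AND PROOFS =====

-- total length of a list of intervals
def pvSumLen : List (Int × Int) → Int
  | [] => 0
  | q :: t => (q.2 - q.1 + 1) + pvSumLen t

theorem pvSumLen_append_singleton (l : List (Int × Int)) (a : Int × Int) :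
    pvSumLen (l ++ [a]) = pvSumLen l + (a.2 - a.1 + 1) := by
  induction l with
  | nil => simp [pvSumLen]
  | cons q t ih => simp [pvSumLen, ih]; ring

theorem pvFoldl_sumLen (l : List (Int × Int)) (acc : Int) :
    l.foldl (fun acc q => acc + (q.2 - q.1 + 1)) acc = acc + pvSumLen l := by
  induction l generalizing acc with
  | nil => simp [pvSumLen]
  | cons q t ih => simp [pvSumLen, ih]; ring

-- the link between A's covered_up_to and B's merged list: the last merged stop equals covered_up_to
def pvLink (c : Int) (m : List (Int × Int)) : Prop :=
  match m.getLast? with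
  | none => c = -1
  | some last => last.2 = c ∧ 0 ≤ c

theorem pv_main (l : List (Int × Int)) :
    ∀ (c nv : Int) (m : List (Int × Int)), (∀ p ∈ l, p.1 ≤ p.2) → pvLink c m →
      (l.foldl pvAStep (c, nv)).2 + pvSumLen (l.foldl pvMergeStep m) = nv + pvSumLen m := by
  induction l with
  | nil => intro c nv m _ _; simp
  | cons p t ih =>
    intro c nv m hle hlink
    have hst : p.1 ≤ p.2 := hle p (List.mem_cons_self ..)
    have hle' : ∀ q ∈ t, q.1 ≤ q.2 := fun q hq => hle q (List.mem_cons_of_mem _ hq)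
    simp only [List.foldl_cons]
    rcases hm : m.getLast? with _ | ⟨a, b⟩
    · -- merged empty, c = -1
      have hc : c = -1 := by simpa [pvLink, hm] using hlink
      rcases List.getLast?_eq_none_iff.mp hm with rfl
      subst hc
      by_cases ht : p.2 < 0
      · -- range entirely below 0: both skip
        have hA : pvAStep (-1, nv) p = (-1, nv) := by
          simp only [pvAStep]
          split_ifs <;> simp only [Prod.mk.injEq, true_and] <;> omega
        have hB : pvMergeStep [] p = [] := by
          simp [pvMergeStep, ht]
        rw [hA, hB]; exact ih (-1) nv [] hle' hlink
      · have hA : pvAStep (-1, nv) p = (p.2, nv - (p.2 - max p.1 0 + 1)) := by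
          simp only [pvAStep]
          split_ifs <;> simp only [Prod.mk.injEq, true_and] <;> omega
        have hB : pvMergeStep [] p = [(max p.1 0, p.2)] := by
          simp [pvMergeStep, ht]
        rw [hA, hB]
        have hlink' : pvLink p.2 [(max p.1 0, p.2)] := by
          simp [pvLink]
          try omega
        have := ih p.2 (nv - (p.2 - max p.1 0 + 1)) [(max p.1 0, p.2)] hle' hlink'
        rw [this]; simp [pvSumLen]; try ring
    · -- merged nonempty, last = (a, b), b = c ≥ 0
      obtain ⟨hb1, hb2⟩ : b = c ∧ 0 ≤ c := by simpa [pvLink, hm] using hlink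
      have hmne : m ≠ [] := by intro h; simp [h] at hm
      have hsplit : m.dropLast ++ [(a, b)] = m := by
        have := List.dropLast_append_getLast hmne
        rwa [List.getLast_eq_iff_getLast?_eq_some hmne |>.mpr hm] at this
      have hsum : pvSumLen m = pvSumLen m.dropLast + (b - a + 1) := by
        conv_lhs => rw [← hsplit]
        rw [pvSumLen_append_singleton]
      by_cases ht : p.2 < 0
      · -- both skip (p.1 ≤ p.2 < 0 ≤ covered_up_to + 1)
        have hA : pvAStep (c, nv) p = (c, nv) := by
          simp only [pvAStep]
          split_ifs <;> simp only [Prod.mk.injEq, true_and] <;> omega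
        have hB : pvMergeStep m p = m := by
          simp [pvMergeStep, ht]
        rw [hA, hB]; exact ih c nv m hle' hlink
      · by_cases hnear : max p.1 0 ≤ b + 1
        · -- B extends the last interval
          have hB : pvMergeStep m p = m.dropLast ++ [(a, max b p.2)] := by
            simp [pvMergeStep, ht, hm, hnear]
          by_cases htc : p.2 ≤ c
          · -- A skips; extension is a no-op on the sum
            have hA : pvAStep (c, nv) p = (c, nv) := by
              simp only [pvAStep]
              split_ifs <;> simp only [Prod.mk.injEq, true_and] <;> omega
            have hmaxb : max b p.2 = b := by omega
            rw [hA, hB, hmaxb, hsplit]; exact ih c nv m hle' hlink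
          · have hA : pvAStep (c, nv) p = (p.2, nv - (p.2 - c)) := by
              simp only [pvAStep]
              split_ifs <;> simp only [Prod.mk.injEq, true_and] <;> omega
            have hmaxb : max b p.2 = p.2 := by omega
            rw [hA, hB, hmaxb]
            have hlink' : pvLink p.2 (m.dropLast ++ [(a, p.2)]) := by
              simp [pvLink, List.getLast?_concat]
              try omega
            have := ih p.2 (nv - (p.2 - c)) (m.dropLast ++ [(a, p.2)]) hle' hlink'
            rw [this, pvSumLen_append_singleton, hsum]
            ring_nf
            omega
        · -- B appends a new interval; A starts past covered_up_to
          have hp1 : p.1 = max p.1 0 := by omega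
          have hB : pvMergeStep m p = m ++ [(max p.1 0, p.2)] := by
            simp [pvMergeStep, ht, hm, hnear]
          have hA : pvAStep (c, nv) p = (p.2, nv - (p.2 - p.1 + 1)) := by
            simp only [pvAStep]
            split_ifs <;> simp only [Prod.mk.injEq, true_and] <;> omega
          rw [hA, hB]
          have hlink' : pvLink p.2 (m ++ [(max p.1 0, p.2)]) := by
            simp [pvLink, List.getLast?_concat]
            try omega
          have := ih p.2 (nv - (p.2 - p.1 + 1)) (m ++ [(max p.1 0, p.2)]) hle' hlink'
          rw [this, pvSumLen_append_singleton, ← hp1]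
          ring

-- ===== VERDICT (by name: the statement is the Claim_ definition above) =====
theorem num_allowed_ips_spec : Claim_equal_num_allowed_ips := by
  intro bs ns _ hpre
  unfold Spec_num_allowed_ips num_allowed_ips num_allowed_ips_alt
  have hperm := PySem.List.sorted2_perm bs (fun p => p.1) (fun p => p.2) false
  have hle : ∀ p ∈ PySem.List.sorted2 bs (fun p => p.1) (fun p => p.2), p.1 ≤ p.2 :=
    fun p hp => hpre p (hperm.mem_iff.mp hp)
  have h := pv_main (PySem.List.sorted2 bs (fun p => p.1) (fun p => p.2)) (-1) ns []
    hle (by simp [pvLink])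
  simp only [pvSumLen] at h
  show (List.foldl pvAStep (-1, ns) (PySem.List.sorted2 bs (fun p => p.1) (fun p => p.2))).2 =
    ns - List.foldl (fun acc q => acc + (q.2 - q.1 + 1)) 0
      (List.foldl pvMergeStep [] (PySem.List.sorted2 bs (fun p => p.1) (fun p => p.2)))
  rw [pvFoldl_sumLen]
  omega
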